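-- pv_equiv track=rewrite | github.com/Matthew-brinkmann/holbertonschool-system_engineering-devops | 0x16-api_advanced/100-count.py | search_title_for_words
-- ===== SOURCE A (Python) =====
-- def search_title_for_words(title, word_list, print_dict):
--     """
--     searches through a title to find words in
--     the word_list
--     """
--     titleAsWordArray = title.split()
--     for word in word_list:
--         for titleWord in titleAsWordArray:
--             if word.lower() == titleWord.lower():
--                 if word.lower() in print_dict.keys():
--                     print_dict[word.lower()] += 1
--                 else:
--                     print_dict[word.lower()] = 1
--     return (print_dict)
-- ===== SOURCE B (Python) =====
-- def search_title_for_words(title, word_list, print_dict):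
--     """
--     searches through a title to find words in
--     the word_list
--     """
--     title_counts = {}
--     for title_word in title.split():
--         tl = title_word.lower()
--         title_counts[tl] = title_counts.get(tl, 0) + 1
--     for word in word_list:
--         wl = word.lower()
--         c = title_counts.get(wl, 0)
--         if c:
--             print_dict[wl] = print_dict.get(wl, 0) + c
--     return print_dict
-- ===== Notes on version B (the rewrite author's own statement) =====
-- stated objective: faster
-- what changed: B builds a dict of lowercased title-word counts once and then makes a single pass over word_list, replacing A's inner scan of the whole title for every word_list entry.
import Mathlib
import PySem

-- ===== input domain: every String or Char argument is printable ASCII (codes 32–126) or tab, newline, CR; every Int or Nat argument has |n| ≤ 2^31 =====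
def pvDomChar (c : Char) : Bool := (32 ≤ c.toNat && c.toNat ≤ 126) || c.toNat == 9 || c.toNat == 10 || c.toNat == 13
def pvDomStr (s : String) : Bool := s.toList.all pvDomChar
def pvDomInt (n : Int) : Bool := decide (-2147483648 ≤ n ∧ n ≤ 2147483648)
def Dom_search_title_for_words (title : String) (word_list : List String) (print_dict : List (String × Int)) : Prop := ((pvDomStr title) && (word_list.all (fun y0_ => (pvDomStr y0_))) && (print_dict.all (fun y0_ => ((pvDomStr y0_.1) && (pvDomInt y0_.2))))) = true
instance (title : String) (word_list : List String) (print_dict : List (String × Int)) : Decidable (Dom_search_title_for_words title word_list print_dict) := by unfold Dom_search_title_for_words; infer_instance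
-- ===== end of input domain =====

-- B replaces A's inner scan over the title (per word_list entry) by a dict of title-word
-- counts built once, then a single pass over word_list (objective: alternative/faster on
-- large titles). Both A and B mutate print_dict in place in Python; the equivalence proved
-- here is about the returned dict (which is that same object).

-- ===== PORT A =====
def search_title_for_words (title : String) (word_list : List String) (print_dict : List (String × Int)) : List (String × Int) :=
  let titleAsWordArray := PySem.Str.split₀ title
  (word_list.foldl (fun d word =>
    titleAsWordArray.foldl (fun d titleWord =>
      if PySem.Str.lower word == PySem.Str.lower titleWord then
        if d.contains (PySem.Str.lower word) then
          d.insert (PySem.Str.lower word) (d.getD (PySem.Str.lower word) 0 + 1)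
        else
          d.insert (PySem.Str.lower word) 1
      else d) d) (PySem.Dict.mk print_dict)).items

-- ===== PORT B =====
def search_title_for_words_alt (title : String) (word_list : List String) (print_dict : List (String × Int)) : List (String × Int) :=
  let title_counts : PySem.Dict String Int :=
    (PySem.Str.split₀ title).foldl (fun tc title_word =>
      tc.insert (PySem.Str.lower title_word) (tc.getD (PySem.Str.lower title_word) 0 + 1))
      PySem.Dict.empty
  (word_list.foldl (fun d word =>
    let wl := PySem.Str.lower word
    let c := title_counts.getD wl 0
    if c ≠ 0 then d.insert wl (d.getD wl 0 + c) else d) (PySem.Dict.mk print_dict)).items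

-- ===== PRECONDITION & SPEC =====
def Spec_search_title_for_words (title : String) (word_list : List String) (print_dict : List (String × Int)) (out : List (String × Int)) : Prop := out = search_title_for_words_alt title word_list print_dict
instance (title : String) (word_list : List String) (print_dict : List (String × Int)) (out : List (String × Int)) : Decidable (Spec_search_title_for_words title word_list print_dict out) := by unfold Spec_search_title_for_words; infer_instance

-- ===== CLAIM (what is proved, stated in full; the proofs are below) =====
def Claim_equal_search_title_for_words : Prop := ∀ (title : String) (word_list : List String) (print_dict : List (String × Int)), Dom_search_title_for_words title word_list print_dict → Spec_search_title_for_words title word_list print_dict (search_title_for_words title word_list print_dict)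

-- ===== LEMMAS AND PROOFS =====

-- overwriting an overwritten key collapses to one insert
theorem pv_ins_ins {κ ν : Type} [BEq κ] [LawfulBEq κ] (d : PySem.Dict κ ν) (k : κ) (v w : ν) :
    (d.insert k v).insert k w = d.insert k w := by
  have hc := PySem.Dict.contains_insert_self d k v
  conv_lhs => rw [PySem.Dict.insert]
  rw [if_pos hc]
  by_cases h : d.contains k = true
  · simp only [PySem.Dict.insert, h, if_true, List.map_map, Function.comp_def]
    congr 1
    apply List.map_congr_left
    intro p _
    by_cases hk : (p.1 == k) = true <;> simp [hk]
  · have hall : ∀ p ∈ d.items, ¬ (p.1 == k) = true := by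
      intro p hp hpk
      exact h (List.any_eq_true.mpr ⟨p, hp, hpk⟩)
    simp only [PySem.Dict.insert, h, if_false, Bool.false_eq_true]
    congr 1
    simp only [List.map_append, List.map_cons, List.map_nil, beq_self_eq_true, if_true]
    congr 1
    have hid : ∀ p ∈ d.items, (if (p.1 == k) = true then (k, w) else p) = p := by
      intro p hp; simp [hall p hp]
    exact (List.map_congr_left hid).trans (List.map_id _)

-- A's "create with 1 or increment" is a single insert of getD+1
theorem pv_inc_eq (d : PySem.Dict String Int) (k : String) :
    (if d.contains k then d.insert k (d.getD k 0 + 1) else d.insert k 1)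
      = d.insert k (d.getD k 0 + 1) := by
  by_cases h : d.contains k = true
  · simp [h]
  · rw [if_neg (by simpa using h),
        PySem.Dict.getD_of_not_contains d 0 (by simpa using h)]
    norm_num

-- A's inner loop over the title words, for a fixed key k, is one conditional insert of
-- getD + (number of title words whose lowering is k)
theorem pv_inner (k : String) (ts : List String) (d : PySem.Dict String Int) :
    ts.foldl (fun d t =>
        if k == PySem.Str.lower t then
          if d.contains k then d.insert k (d.getD k 0 + 1) else d.insert k 1
        else d) d
      = (if (ts.map PySem.Str.lower).count k = 0 then d
         else d.insert k (d.getD k 0 + ((ts.map PySem.Str.lower).count k : Int))) := by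
  induction ts generalizing d with
  | nil => simp
  | cons t ts ih =>
    by_cases hk : k = PySem.Str.lower t
    · have hcnt : ((t :: ts).map PySem.Str.lower).count k
          = (ts.map PySem.Str.lower).count k + 1 := by
        simp [hk]
      simp only [List.foldl_cons]
      rw [if_pos (by simp [hk]), pv_inc_eq, ih, hcnt]
      by_cases h0 : (ts.map PySem.Str.lower).count k = 0
      · rw [h0, if_pos rfl, if_neg (by omega)]
        norm_num
      · rw [if_neg h0, if_neg (by omega),
            PySem.Dict.getD_insert_self, pv_ins_ins]
        congr 1
        push_cast
        ring
    · have hcnt : ((t :: ts).map PySem.Str.lower).count k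
          = (ts.map PySem.Str.lower).count k := by
        simp [Ne.symm hk]
      simp only [List.foldl_cons]
      rw [if_neg (by simp [hk]), hcnt]
      exact ih d

-- B's counter dict looks up exactly that number
theorem pv_counter_getD (title : String) (k : String) :
    ((PySem.Str.split₀ title).foldl (fun tc w =>
        tc.insert (PySem.Str.lower w) (tc.getD (PySem.Str.lower w) 0 + 1))
        PySem.Dict.empty).getD k 0
      = (((PySem.Str.split₀ title).map PySem.Str.lower).count k : Int) := by
  rw [← List.foldl_map (f := PySem.Str.lower)
        (g := fun (tc : PySem.Dict String Int) x => tc.insert x (tc.getD x 0 + 1)),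
      PySem.Dict.getD_foldl_insert_add_one]
  simp

-- two folds over the same list with pointwise-equal step functions agree
theorem pv_foldl_congr {α β : Type} (f g : α → β → α) (h : ∀ a b, f a b = g a b)
    (init : α) (l : List β) : l.foldl f init = l.foldl g init := by
  have hfg : f = g := funext fun a => funext (h a)
  rw [hfg]

-- ===== VERDICT (by name: the statement is the Claim_ definition above) =====
theorem search_title_for_words_spec : Claim_equal_search_title_for_words := by
  intro title word_list print_dict _
  show (List.foldl (fun d word =>
      List.foldl (fun (d : PySem.Dict String Int) titleWord =>
        if PySem.Str.lower word == PySem.Str.lower titleWord then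
          if d.contains (PySem.Str.lower word) then
            d.insert (PySem.Str.lower word) (d.getD (PySem.Str.lower word) 0 + 1)
          else d.insert (PySem.Str.lower word) 1
        else d) d (PySem.Str.split₀ title))
      (PySem.Dict.mk print_dict) word_list).items
    = (List.foldl (fun (d : PySem.Dict String Int) word =>
        if (((PySem.Str.split₀ title).foldl (fun (tc : PySem.Dict String Int) w =>
              tc.insert (PySem.Str.lower w) (tc.getD (PySem.Str.lower w) 0 + 1))
              PySem.Dict.empty).getD (PySem.Str.lower word) 0) ≠ 0 then
          d.insert (PySem.Str.lower word) (d.getD (PySem.Str.lower word) 0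
            + (((PySem.Str.split₀ title).foldl (fun (tc : PySem.Dict String Int) w =>
                tc.insert (PySem.Str.lower w) (tc.getD (PySem.Str.lower w) 0 + 1))
                PySem.Dict.empty).getD (PySem.Str.lower word) 0))
        else d) (PySem.Dict.mk print_dict) word_list).items
  refine congrArg PySem.Dict.items (pv_foldl_congr _ _ ?_ _ _)
  intro d word
  rw [pv_inner (PySem.Str.lower word) (PySem.Str.split₀ title) d, pv_counter_getD]
  by_cases h0 : ((PySem.Str.split₀ title).map PySem.Str.lower).count (PySem.Str.lower word) = 0
  · simp [h0]
  · rw [if_neg h0, if_pos (by exact_mod_cast h0)]
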